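-- pv_equiv track=rewrite | github.com/federicopfund/Python_Scala | Ejercicios/ejercicios_python/Clase11/es_potencia.py | es_potencia
-- ===== SOURCE A (Python) =====
-- def es_potencia(n, b): # b^x = n ?
--     if n == b: # Caso base x = 1
--         return True
--     if n == 1: # Caso base x = 0
--         return True
--     if n > b: # Caso recursivo con n mayor a b (potencia: b^x = n?)
--         resto = n % b
--         if resto == 0:
--             return es_potencia(n // b, b)
--         else:
--             return False
--     if n < b: # Caso recursivo con n menor a b (raiz: n^x = b?)
--         resto = b % n
--         if resto == 0:
--             return es_potencia(n, b // n)
--         else: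
--             return False
-- ===== SOURCE B (Python) =====
-- def es_potencia(n, b):  # b^x = n ?
--     # Symmetric reduction: until n == b or n == 1, one divmod of the larger
--     # of the pair by the smaller; nonzero remainder -> False, otherwise the
--     # larger is replaced by the quotient.
--     while n != b and n != 1:
--         q, r = divmod(max(n, b), min(n, b))
--         if r:
--             return False
--         if n > b:
--             n = q
--         else:
--             b = q
--     return True
-- ===== Notes on version B (the rewrite author's own statement) =====
-- stated objective: alternative
-- what changed: A's four-branch tail recursion is replaced by a symmetric-reduction loop: while n != b and n != 1, a single divmod of max(n,b) by min(n,b) either rejects (nonzero remainder) or replaces the larger member of the pair by the quotient.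
import Mathlib
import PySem

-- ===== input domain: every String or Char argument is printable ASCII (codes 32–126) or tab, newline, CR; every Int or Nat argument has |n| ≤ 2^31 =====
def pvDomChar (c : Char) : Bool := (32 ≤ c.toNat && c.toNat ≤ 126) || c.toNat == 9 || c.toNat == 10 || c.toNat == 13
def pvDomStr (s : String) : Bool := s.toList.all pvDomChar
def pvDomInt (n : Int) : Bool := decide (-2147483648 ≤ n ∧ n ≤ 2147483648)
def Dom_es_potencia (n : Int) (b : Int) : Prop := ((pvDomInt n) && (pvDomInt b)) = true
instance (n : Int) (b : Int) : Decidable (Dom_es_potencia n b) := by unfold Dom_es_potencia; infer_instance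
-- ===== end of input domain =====

-- B replaces A's four-branch tail recursion by a symmetric-reduction loop: one
-- divmod of max(n,b) by min(n,b) per step, replacing the larger by the quotient
-- ("alternative", no speed claim). Both ports use fuel n.natAbs + b.natAbs + 2,
-- an upper bound on the number of steps on every input Pre_ admits; fuel
-- exhaustion returns false and is unreachable inside Pre_.

-- ===== PORT A =====
-- literal transliteration of A's recursion (fuel makes it total; the branch
-- order and the %, // operations are exactly A's)
def esPotenciaGo : Nat → Int → Int → Bool
  | 0, _, _ => false
  | f+1, n, b =>
    if n = b then true                  -- Caso base x = 1
    else if n = 1 then true             -- Caso base x = 0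
    else if n > b then
      (let resto := PySem.Int.mod n b
       if resto = 0 then esPotenciaGo f (PySem.Int.floordiv n b) b else false)
    else if n < b then
      (let resto := PySem.Int.mod b n
       if resto = 0 then esPotenciaGo f n (PySem.Int.floordiv b n) else false)
    else false                          -- unreachable (Python would fall through)

def es_potencia (n : Int) (b : Int) : Bool :=
  esPotenciaGo (n.natAbs + b.natAbs + 2) n b

-- ===== PORT B =====
-- literal transliteration of Source B's while loop: one fuel step per iteration;
-- 'q, r = divmod(max(n, b), min(n, b))' is ported as floordiv/mod of max/min,
-- 'if r:' is Python truthiness on r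
def esPotenciaReduce : Nat → Int → Int → Bool
  | 0, _, _ => false
  | f+1, n, b =>
    if n ≠ b ∧ n ≠ 1 then
      let q := PySem.Int.floordiv (max n b) (min n b)
      let r := PySem.Int.mod (max n b) (min n b)
      if r ≠ 0 then false
      else if n > b then esPotenciaReduce f q b
      else esPotenciaReduce f n q
    else true

def es_potencia_alt (n : Int) (b : Int) : Bool :=
  esPotenciaReduce (n.natAbs + b.natAbs + 2) n b

-- ===== PRECONDITION & SPEC =====
-- Pre_ excludes exactly the inputs where A does not return: n = 0 with b ≠ 0 and
-- b = 0 with n ∉ {0,1} raise ZeroDivisionError, and b = 1 with n ≥ 2 recurses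
-- forever on (n, 1); B raises/loops there too.
def Pre_es_potencia (n : Int) (b : Int) : Prop :=
  ¬ ((n = 0 ∧ b ≠ 0) ∨ (b = 0 ∧ n ≠ 0 ∧ n ≠ 1) ∨ (b = 1 ∧ 2 ≤ n))
instance (n : Int) (b : Int) : Decidable (Pre_es_potencia n b) := by
  unfold Pre_es_potencia; infer_instance
def pvWitness_es_potencia : Int × Int := (8, 2)

def Spec_es_potencia (n : Int) (b : Int) (out : Bool) : Prop := out = es_potencia_alt n b
instance (n : Int) (b : Int) (out : Bool) : Decidable (Spec_es_potencia n b out) := by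
  unfold Spec_es_potencia; infer_instance

-- ===== CLAIM (what is proved, stated in full; the proofs are below) =====
def Claim_equal_es_potencia : Prop := ∀ (n : Int) (b : Int), Dom_es_potencia n b → Pre_es_potencia n b → Spec_es_potencia n b (es_potencia n b)

-- ===== LEMMAS AND PROOFS =====
-- the two step functions agree at every fuel: when n ≠ b, max/min pick exactly
-- the operands of whichever of A's two recursive branches fires
theorem esPotenciaGo_eq_reduce : ∀ (f : Nat) (n b : Int),
    esPotenciaGo f n b = esPotenciaReduce f n b := by
  intro f
  induction f with
  | zero => intro n b; rfl
  | succ f ih =>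
    intro n b
    simp only [esPotenciaGo, esPotenciaReduce]
    by_cases hb : n = b
    · simp [hb]
    · by_cases h1 : n = 1
      · simp [h1]
      · by_cases hgt : n > b
        · have hmax : max n b = n := by omega
          have hmin : min n b = b := by omega
          simp only [hb, h1, hgt, hmax, hmin, ne_eq, not_false_iff, and_self,
            if_true, if_false, ite_not]
          split_ifs with hm <;> simp_all [ih]
        · have hlt : n < b := by omega
          have hmax : max n b = b := by omega
          have hmin : min n b = n := by omega
          simp only [hb, h1, hgt, hlt, hmax, hmin, ne_eq, not_false_iff, and_self,
            if_true, if_false, ite_not]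
          split_ifs with hm <;> simp_all [ih]

-- ===== VERDICT (by name: the statement is the Claim_ definition above) =====
theorem es_potencia_spec : Claim_equal_es_potencia := by
  intro n b _ _
  unfold Spec_es_potencia es_potencia es_potencia_alt
  exact esPotenciaGo_eq_reduce _ n b
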